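/- GENERATED by tools/from_farm_form.py from prooffarm-gif/accepted/DGifDecompressLine.1/Proof.lean (a worked proof of the farm's unit `DGifDecompressLine.1`,
   accepted by the verdict) — do not edit. -/
import Gif.Spec.Units.DGifDecompressLine_1
import Gif.Spec.AllSegs
import Gif.Spec.Proved.DGifDecompressLine_1_Lemmas

open X86 X86.User Asan ProgX.Base ProgX.Base.Spec Gif.Spec

set_option maxRecDepth 4000
set_option maxHeartbeats 4000000

/-- Segment 1 of `DGifDecompressLine` (106B3DH … 106BE3H and 107098H; dgif_lib.c:866-880): from `Entered` behind the prologue, the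
checked load of `GifFile->Private`, the four checked loads of pv's scalars (StackPtr, EOFCode, ClearCode, LastCode), the constant
locals into their slots; the test of l.876 (`StackPtr > 4095`) cannot fire by [LZ5]; l.880 `StackPtr = 0`: the head of the main loop
(`Head`), else the spills and the head of the first pop loop (`Pop`). -/
theorem Gif.Spec.Proved.DGifDecompressLine_1_ok : Gif.Spec.DGifDecompressLine_1.Statement := by
  intro Lay hLay μ hμ u₀ hcode h_load8 h_load4 H rest frames F R n e ret v hat
  obtain ⟨hbody, h_rdi, h_rbx, h_r15⟩ := hat
  -- 1. THE PRELUDE (the same in every segment of this function; Gif/Spec/LzwCarry.lean §2)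
  -- the entry state's facts: `he_room`, `he_top`, `he_retAddr`, …
  have he := hbody.entry
  v_entry he
  -- where gif and pv are, and that LineLen is an `int`
  have hgin := hbody.gif_inside
  have hpin := hbody.pv_inside
  have hn31 : n < 2 ^ 31 := hbody.len_lt
  have hgif : (e.reg .rdi).toNat = F.gif := hbody.pre.2.2.1
  -- the present state, in the walker's names
  have w_rip := hbody.rip
  have c_rsp : v.reg .rsp = e.reg .rsp - 200 := hbody.rsp
  have c_rdi : v.reg .rdi = e.reg .rdi := h_rdi
  have c_rbx : v.reg .rbx = e.reg .rdi := h_rbx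
  have c_r15 : v.reg .r15 = (e.reg .rsp - 120) >>> 3 := h_r15
  have w_eq : Mem.EqOn ProgX.Base.L.textLo ProgX.Base.L.textHi u₀.mem v.mem := ProgX.Base.conv_code_eqOn hbody.code
  have hdf : v.flags .df = false := (show abiInv _ from hbody.abi).1
  have hmx : v.mxcsr &&& 0x1F80 = 0x1F80 := (show abiInv _ from hbody.abi).2
  have hsse := ProgX.Base.sseOK_of_abiInv hbody.abi
  have w_kept : RegsKept [.rsp] v v := RegsKept.refl _ _
  -- 2. THE FIELDS AND SLOTS THE SEGMENT LOADS
  -- l.866 `GifFile->Private` [G2]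
  have hpriv := hbody.ok.shape.priv
  simp only [gfield] at hpriv
  have l_priv : v.mem.readLE (e.reg .rdi + 0x70) 8 = F.pv := by
    rw [rd_eq_readLE v.mem (e.reg .rdi + 0x70) (F.gif + 112) 8 (by u_omega)]
    exact hpriv
  -- l.868 `Private->StackPtr`, `≤ 4095` [LZ5]
  obtain ⟨sp, l_sp⟩ : ∃ sp, v.mem.readLE (UInt64.ofNat F.pv + 0x28) 4 = sp := ⟨_, rfl⟩
  have hsp : sp ≤ 4095 := by
    have h := hbody.lz.sp
    simp only [gfield] at h
    rw [← l_sp, rd_eq_readLE v.mem (UInt64.ofNat F.pv + 0x28) (F.pv + 40) 4 (by u_omega)]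
    exact h
  -- l.872 `Private->EOFCode`, l.873 `Private->ClearCode` (`≤ 256` [LZ2]), l.874 `Private->LastCode` (any value)
  obtain ⟨ce, l_eof⟩ : ∃ ce, v.mem.readLE (UInt64.ofNat F.pv + 0x10) 4 = ce := ⟨_, rfl⟩
  obtain ⟨cc, l_clear⟩ : ∃ cc, v.mem.readLE (UInt64.ofNat F.pv + 0xc) 4 = cc := ⟨_, rfl⟩
  obtain ⟨lc, l_last⟩ : ∃ lc, v.mem.readLE (UInt64.ofNat F.pv + 0x20) 4 = lc := ⟨_, rfl⟩
  have hcc_eq : rd v.mem (F.pv + 12) 4 = cc := by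
    rw [← l_clear, rd_eq_readLE v.mem (UInt64.ofNat F.pv + 0xc) (F.pv + 12) 4 (by u_omega)]
  have hce_eq : rd v.mem (F.pv + 16) 4 = ce := by
    rw [← l_eof, rd_eq_readLE v.mem (UInt64.ofNat F.pv + 0x10) (F.pv + 16) 4 (by u_omega)]
  have hcc : cc ≤ 256 := by
    have h := hbody.lz.clear
    simp only [gfield] at h
    rw [← hcc_eq]
    exact h
  have hce : ce ≤ 257 := by
    have h := hbody.lz.eof
    simp only [gfield] at h
    rw [hcc_eq, hce_eq] at h
    omega
  -- the two arguments in their slots (106BD9H, 106BDEH)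
  have k_line : v.mem.readLE (e.reg .rsp - 152) 8 = (e.reg .rsi).toNat := hbody.s_line
  have k_len : v.mem.readLE (e.reg .rsp - 160) 4 = n := hbody.s_len
  -- 3. THE WALK: the five checked loads, the two tests, up to the three exits
  u_walk hcode [hμ.vendor]
    until [Gif.L.DGifDecompressLine.at_106be3, Gif.L.DGifDecompressLine.at_106f7d, Gif.L.DGifDecompressLine.at_10709d]
    span [ProgX.Base.L.textLo, ProgX.Base.L.textHi] side (v_side)
  -- 4. THE CHECK GOALS: the object is live, the access lies inside it
  case check_106b41 =>
    -- l.866 `GifFile->Private`: inside gif [G1]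
    have hun : ShadowUntouched v.mem s_106b41.mem := by v_untouched
    have hl : LiveIn (H.liveObjs ++ rest) (DGifDecompressLine.framesIn frames e) F.gif 120 :=
      hbody.ok.gif_live.liveIn rest _ (Nat.le_refl _) (Nat.le_refl _)
    exact hl.accSmall hbody.inv.shadow hun _ 8 (by decide) (by u_omega) (by u_omega)
  case check_106b4e =>
    -- l.868 `Private->StackPtr`: a scalar of pv [G2]
    have hun : ShadowUntouched v.mem s_106b4e.mem := by v_untouched
    have hl : LiveIn (H.liveObjs ++ rest) (DGifDecompressLine.framesIn frames e) F.pv 24936 :=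
      hbody.ok.pv_live.liveIn rest _ (Nat.le_refl _) (Nat.le_refl _)
    exact hl.accSmall hbody.inv.shadow hun _ 4 (by decide) (by u_omega) (by u_omega)
  case check_106b73 =>
    -- l.872 `Private->EOFCode`
    have hun : ShadowUntouched v.mem s_106b73.mem := by v_untouched
    have hl : LiveIn (H.liveObjs ++ rest) (DGifDecompressLine.framesIn frames e) F.pv 24936 :=
      hbody.ok.pv_live.liveIn rest _ (Nat.le_refl _) (Nat.le_refl _)
    exact hl.accSmall hbody.inv.shadow hun _ 4 (by decide) (by u_omega) (by u_omega)
  case check_106b84 =>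
    -- l.873 `Private->ClearCode`
    have hun : ShadowUntouched v.mem s_106b84.mem := by v_untouched
    have hl : LiveIn (H.liveObjs ++ rest) (DGifDecompressLine.framesIn frames e) F.pv 24936 :=
      hbody.ok.pv_live.liveIn rest _ (Nat.le_refl _) (Nat.le_refl _)
    exact hl.accSmall hbody.inv.shadow hun _ 4 (by decide) (by u_omega) (by u_omega)
  case check_106b95 =>
    -- l.874 `Private->LastCode`
    have hun : ShadowUntouched v.mem s_106b95.mem := by v_untouched
    have hl : LiveIn (H.liveObjs ++ rest) (DGifDecompressLine.framesIn frames e) F.pv 24936 :=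
      hbody.ok.pv_live.liveIn rest _ (Nat.le_refl _) (Nat.le_refl _)
    exact hl.accSmall hbody.inv.shadow hun _ 4 (by decide) (by u_omega) (by u_omega)
  -- 5. THE EXITS
  · -- 0x107098 (l.877, `StackPtr > LZ_MAX_CODE`): cannot fire [LZ5]
    exfalso
    exact Gif.Spec.DGifDecompressLine_1.dl1_sp_small sp hsp hbr_106ba8
  · -- 0x106be3 (l.883): `StackPtr ≠ 0`: the head of the first pop loop, `Pop`
    -- (first, in the walker's own context: `v_inv` runs out of recursion depth behind the facts below)
    have habi : (conv u₀).inv s_106bde := by v_inv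
    -- the values stored, as numbers
    have e_pv : (UInt64.ofNat F.pv).toNat = F.pv := toNat_ofNat_addr F.pv (by omega)
    have e_stack : (UInt64.ofNat F.pv + 344).toNat = F.pv + 344 :=
      Gif.Spec.DGifDecompressLine_1.dl1_addr_add F.pv 344 (by omega)
    have e_suffix : (UInt64.ofNat F.pv + 4439).toNat = F.pv + 4439 :=
      Gif.Spec.DGifDecompressLine_1.dl1_addr_add F.pv 4439 (by omega)
    have e_prefix : (UInt64.ofNat F.pv + 8536).toNat = F.pv + 8536 :=
      Gif.Spec.DGifDecompressLine_1.dl1_addr_add F.pv 8536 (by omega)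
    have e_cc : (BitVec.ofNat 32 cc).toNat = cc := Gif.Spec.toNat_ofNat32 cc (by omega)
    have e_ce : (BitVec.ofNat 32 ce).toNat = ce := Gif.Spec.toNat_ofNat32 ce (by omega)
    rw [e_pv, e_stack, e_suffix, e_prefix, e_cc, e_ce] at w_mem
    -- what was stored: the return addresses of the checks, the constant locals, LastCode, the two spills, the shadow index
    have hun : ShadowUntouched v.mem s_106bde.mem := by v_untouched
    have hsame : Mem.SameExcept [⟨(e.reg .rsp).toNat - 208, (e.reg .rsp).toNat - 168⟩,
        ⟨(e.reg .rsp).toNat - 156, (e.reg .rsp).toNat - 152⟩,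
        ⟨(e.reg .rsp).toNat - 144, (e.reg .rsp).toNat - 120⟩] v.mem s_106bde.mem := by
      rw [w_mem]
      u_same
    obtain ⟨k_body, k_mu, k_rd⟩ :=
      Gif.Spec.DGifDecompressLine_1.dl1_carry hbody (cut' := Gif.L.DGifDecompressLine.at_106be3) w_rip w_rsp w_eq habi hun hsame (by
        simp only [List.forall_mem_cons, List.not_mem_nil, false_imp_iff, implies_true, and_true,
          Gif.Spec.DGifDecompressLine_1.dl1_Win]
        omega)
    -- `Locals`: the five slots just written
    have k_loc : DGifDecompressLine.Locals F e s_106bde := by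
      refine ⟨?_, ?_, ?_, ?_, ?_⟩
      · u_read
      · simp only [gfield]
        rw [k_rd (F.pv + 12) 4 (by omega) (by omega), hcc_eq]
        u_read
      · u_read
      · simp only [gfield]
        rw [k_rd (F.pv + 16) 4 (by omega) (by omega), hce_eq]
        u_read
      · u_read
    -- `Pop`: `Body`, `Locals`, then `rbx`, `rbp`, `r14`, `r15`, the two spill slots, the measure (any `m` above it)
    refine ReachVia.done (Or.inl ⟨mu R s_106bde.mem F.pv + 1, k_body, k_loc, ?_, ?_, ?_, w_r15, ?_, ?_, ?_⟩)
    · -- StackPtr ≤ 4095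
      rw [w_rbx, Gif.Spec.toNat_ofBV_ofNat32 sp (by omega)]
      exact hsp
    · -- i = 0
      rw [w_rbp]
      exact Nat.zero_le _
    · -- r14d = LineLen
      rw [w_r14, Gif.Spec.toNat_ofBV_ofNat32 n (by omega)]
    · -- `Private` spilled to [rsp+38H]
      u_read
    · -- `Prefix` spilled to [rsp+40H]
      u_read
    · exact Nat.lt_succ_self _
  · -- 0x106f7d (l.888): `StackPtr = 0`: the head of the main loop, `Head`
    have habi : (conv u₀).inv s_106bc0 := by v_inv
    have hsp0 : sp = 0 := by omega
    -- the values stored, as numbers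
    have e_pv : (UInt64.ofNat F.pv).toNat = F.pv := toNat_ofNat_addr F.pv (by omega)
    have e_stack : (UInt64.ofNat F.pv + 344).toNat = F.pv + 344 :=
      Gif.Spec.DGifDecompressLine_1.dl1_addr_add F.pv 344 (by omega)
    have e_suffix : (UInt64.ofNat F.pv + 4439).toNat = F.pv + 4439 :=
      Gif.Spec.DGifDecompressLine_1.dl1_addr_add F.pv 4439 (by omega)
    have e_prefix : (UInt64.ofNat F.pv + 8536).toNat = F.pv + 8536 :=
      Gif.Spec.DGifDecompressLine_1.dl1_addr_add F.pv 8536 (by omega)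
    have e_cc : (BitVec.ofNat 32 cc).toNat = cc := Gif.Spec.toNat_ofNat32 cc (by omega)
    have e_ce : (BitVec.ofNat 32 ce).toNat = ce := Gif.Spec.toNat_ofNat32 ce (by omega)
    rw [e_stack, e_suffix, e_cc, e_ce] at w_mem
    -- what was stored: the return addresses of the checks, the constant locals, LastCode, the shadow index
    have hun : ShadowUntouched v.mem s_106bc0.mem := by v_untouched
    have hsame : Mem.SameExcept [⟨(e.reg .rsp).toNat - 208, (e.reg .rsp).toNat - 168⟩,
        ⟨(e.reg .rsp).toNat - 156, (e.reg .rsp).toNat - 152⟩,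
        ⟨(e.reg .rsp).toNat - 144, (e.reg .rsp).toNat - 120⟩] v.mem s_106bc0.mem := by
      rw [w_mem]
      u_same
    obtain ⟨k_body, k_mu, k_rd⟩ :=
      Gif.Spec.DGifDecompressLine_1.dl1_carry hbody (cut' := Gif.L.DGifDecompressLine.at_106f7d) w_rip w_rsp w_eq habi hun hsame (by
        simp only [List.forall_mem_cons, List.not_mem_nil, false_imp_iff, implies_true, and_true,
          Gif.Spec.DGifDecompressLine_1.dl1_Win]
        omega)
    -- `Locals`: the five slots just written
    have k_loc : DGifDecompressLine.Locals F e s_106bc0 := by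
      refine ⟨?_, ?_, ?_, ?_, ?_⟩
      · u_read
      · simp only [gfield]
        rw [k_rd (F.pv + 12) 4 (by omega) (by omega), hcc_eq]
        u_read
      · u_read
      · simp only [gfield]
        rw [k_rd (F.pv + 16) 4 (by omega) (by omega), hce_eq]
        u_read
      · u_read
    -- the two counters: `ebx = ebp = StackPtr = 0`
    have e_rbx : (s_106bc0.reg .rbx).toNat = 0 := by
      rw [w_rbx, Gif.Spec.toNat_ofBV_ofNat32 sp (by omega)]
      exact hsp0
    have e_rbp : (s_106bc0.reg .rbp).toNat = 0 := by
      rw [w_rbp, Gif.Spec.toNat_ofBV_ofNat32 sp (by omega)]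
      exact hsp0
    -- `Head`: `Main` (`Body`, `Locals`, `r14`, `r13`, `rbx`, `rbp`, W1), the measure as it is
    refine ReachVia.done (Or.inr (Or.inl ⟨mu R s_106bc0.mem F.pv, ⟨k_body, k_loc, ?_, ?_, ?_, ?_, ?_⟩, rfl⟩))
    · -- r14 = Private
      rw [w_r14]
      exact e_pv
    · -- r13 = Prefix
      rw [w_r13]
      exact e_prefix
    · -- StackPtr = 0 ≤ 4095
      rw [e_rbx]
      exact Nat.zero_le _
    · -- i = 0 ≤ LineLen
      rw [e_rbp]
      exact Nat.zero_le _
    · -- W1: StackPtr = 0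
      intro _
      exact e_rbx
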